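-- pv_equiv track=rewrite | github.com/WQZHttm/Team-21-Project | Baseline Schedule.py | cost_Schedule
-- ===== SOURCE A (Python) =====
-- A = ["A1", "A2", "A3", "A4", "A5"]
--
-- D = ["D1", "D2", "D3"]
--
-- def cost_Schedule(Schedule, k_rate, p_rate, f_rate, PH):
--    cost = 0
--    day = 0
--    for days in Schedule.values():
--       day += 1
--       shift = 0
--       for stuff in days.values():
--          shift += 1
--          for ppl in stuff:
--             p, f, k = p_rate[0], f_rate[0], k_rate[0]
--             if day >= 6: p, f, k = p_rate[1], f_rate[1], k_rate[1]
--             if PH[day-1] == 1: p, f, k = p_rate[2], f_rate[2], k_rate[2]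
--             scale = 1
--             if shift == 12: scale = 3
--             if ppl in A: cost += (scale*k)
--             elif ppl in D: cost += (scale*p)
--             else: cost += (scale*f)
--    return cost
-- ===== SOURCE B (Python) =====
-- A = ["A1", "A2", "A3", "A4", "A5"]
--
-- D = ["D1", "D2", "D3"]
--
-- def cost_Schedule(Schedule, k_rate, p_rate, f_rate, PH):
--    # Pass 1: tabulate, per (day, shift) with 1-based indices, how many people
--    # are A-staff, D-staff or other.
--    counts = {}
--    for day, days in enumerate(Schedule.values(), 1):
--       for shift, stuff in enumerate(days.values(), 1):
--          nA = nD = nO = 0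
--          for ppl in stuff:
--             if ppl in A: nA += 1
--             elif ppl in D: nD += 1
--             else: nO += 1
--          counts[(day, shift)] = (nA, nD, nO)
--    # Pass 2: price each non-empty shift from its counts.
--    total = 0
--    for (day, shift), (nA, nD, nO) in counts.items():
--       if nA or nD or nO:
--          p, f, k = p_rate[0], f_rate[0], k_rate[0]
--          if day >= 6: p, f, k = p_rate[1], f_rate[1], k_rate[1]
--          if PH[day-1] == 1: p, f, k = p_rate[2], f_rate[2], k_rate[2]
--          scale = 3 if shift == 12 else 1
--          total += scale * (k*nA + p*nD + f*nO)
--    return total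
-- ===== Notes on version B (the rewrite author's own statement) =====
-- stated objective: alternative
-- what changed: B replaces A's per-person rate lookup and cost accumulation by two passes: it first tabulates a (day,shift)->(#A,#D,#other) count table over the schedule, then prices each non-empty shift once as scale*(k*nA + p*nD + f*nO), instead of re-selecting the rates and adding person by person.
import Mathlib
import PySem

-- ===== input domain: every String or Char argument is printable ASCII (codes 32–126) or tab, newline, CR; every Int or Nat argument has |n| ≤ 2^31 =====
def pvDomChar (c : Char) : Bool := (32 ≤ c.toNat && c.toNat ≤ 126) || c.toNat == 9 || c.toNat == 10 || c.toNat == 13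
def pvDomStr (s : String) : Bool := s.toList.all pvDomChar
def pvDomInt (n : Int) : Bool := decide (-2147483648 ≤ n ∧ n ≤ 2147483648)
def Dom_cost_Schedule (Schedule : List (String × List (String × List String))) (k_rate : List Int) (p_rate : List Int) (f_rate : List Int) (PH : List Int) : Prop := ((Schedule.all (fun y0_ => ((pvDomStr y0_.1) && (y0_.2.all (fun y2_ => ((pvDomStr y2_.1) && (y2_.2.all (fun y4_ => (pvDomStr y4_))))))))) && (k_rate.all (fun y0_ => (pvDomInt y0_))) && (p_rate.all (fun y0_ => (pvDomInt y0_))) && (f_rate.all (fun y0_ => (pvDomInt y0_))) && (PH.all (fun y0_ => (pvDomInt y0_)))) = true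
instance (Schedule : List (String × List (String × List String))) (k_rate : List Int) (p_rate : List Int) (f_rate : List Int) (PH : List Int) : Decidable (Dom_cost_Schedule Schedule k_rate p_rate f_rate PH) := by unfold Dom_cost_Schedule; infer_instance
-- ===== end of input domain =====

-- B re-prices the schedule in two passes (a (day,shift) → staff-count table, then one priced term per
-- non-empty shift) instead of A's per-person accumulation; same cost, alternative decomposition.

-- module-level constants A and D of the Python file
def pyA : List String := ["A1", "A2", "A3", "A4", "A5"]
def pyD : List String := ["D1", "D2", "D3"]

-- ===== PORT A =====
-- Python indexing p_rate[0] … PH[day-1] is ported with PySem.List.pyGetD; Pre_ guarantees every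
-- index accessed is in range, where pyGetD is exact.
def cost_Schedule (Schedule : List (String × List (String × List String))) (k_rate : List Int) (p_rate : List Int) (f_rate : List Int) (PH : List Int) : Int :=
  (Schedule.foldl
    (fun (st : Int × Int) dayE =>
      let day := st.2 + 1
      let st2 :=
        dayE.2.foldl
          (fun (st2 : Int × Int) shiftE =>
            let shift := st2.2 + 1
            let cost2 :=
              shiftE.2.foldl
                (fun (cost : Int) ppl =>
                  let p := PySem.List.pyGetD p_rate 0 0
                  let f := PySem.List.pyGetD f_rate 0 0
                  let k := PySem.List.pyGetD k_rate 0 0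
                  let pfk := if day ≥ 6 then
                      (PySem.List.pyGetD p_rate 1 0, PySem.List.pyGetD f_rate 1 0, PySem.List.pyGetD k_rate 1 0)
                    else (p, f, k)
                  let pfk := if PySem.List.pyGetD PH (day - 1) 0 = 1 then
                      (PySem.List.pyGetD p_rate 2 0, PySem.List.pyGetD f_rate 2 0, PySem.List.pyGetD k_rate 2 0)
                    else pfk
                  let scale : Int := if shift = 12 then 3 else 1
                  if pyA.contains ppl then cost + scale * pfk.2.2
                  else if pyD.contains ppl then cost + scale * pfk.1
                  else cost + scale * pfk.2.1)
                st2.1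
            (cost2, shift))
          (st.1, 0)
      (st2.1, day))
    (0, 0)).1

-- ===== PORT B =====
-- counts of (A-staff, D-staff, other) in one shift (Source B's pass-1 inner loop)
def pvShiftCounts (stuff : List String) : Int × Int × Int :=
  stuff.foldl
    (fun (t : Int × Int × Int) ppl =>
      if pyA.contains ppl then (t.1 + 1, t.2.1, t.2.2)
      else if pyD.contains ppl then (t.1, t.2.1 + 1, t.2.2)
      else (t.1, t.2.1, t.2.2 + 1))
    (0, 0, 0)

def cost_Schedule_alt (Schedule : List (String × List (String × List String))) (k_rate : List Int) (p_rate : List Int) (f_rate : List Int) (PH : List Int) : Int :=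
  -- pass 1: the counts table, keyed by 1-based (day, shift); keys are distinct by construction,
  -- so the dict in insertion order is this flat list of entries
  let counts : List ((Int × Int) × (Int × Int × Int)) :=
    (PySem.List.enumerate Schedule 1).flatMap
      (fun dp => (PySem.List.enumerate dp.2.2 1).map (fun sp => ((dp.1, sp.1), pvShiftCounts sp.2.2)))
  -- pass 2: price each non-empty shift from its counts
  counts.foldl
    (fun (total : Int) e =>
      if e.2.1 ≠ 0 ∨ e.2.2.1 ≠ 0 ∨ e.2.2.2 ≠ 0 then
        let p := PySem.List.pyGetD p_rate 0 0
        let f := PySem.List.pyGetD f_rate 0 0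
        let k := PySem.List.pyGetD k_rate 0 0
        let pfk := if e.1.1 ≥ 6 then
            (PySem.List.pyGetD p_rate 1 0, PySem.List.pyGetD f_rate 1 0, PySem.List.pyGetD k_rate 1 0)
          else (p, f, k)
        let pfk := if PySem.List.pyGetD PH (e.1.1 - 1) 0 = 1 then
            (PySem.List.pyGetD p_rate 2 0, PySem.List.pyGetD f_rate 2 0, PySem.List.pyGetD k_rate 2 0)
          else pfk
        let scale : Int := if e.1.2 = 12 then 3 else 1
        total + scale * (pfk.2.2 * e.2.1 + pfk.1 * e.2.2.1 + pfk.2.1 * e.2.2.2)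
      else total)
    0

-- ===== PRECONDITION & SPEC =====
-- Pre_ holds exactly when Python A raises no IndexError: for every 1-based day that has at least one
-- person scheduled, the rate lists are long enough for the rate indices that day actually uses and
-- PH covers that day.
def Pre_cost_Schedule (Schedule : List (String × List (String × List String))) (k_rate : List Int) (p_rate : List Int) (f_rate : List Int) (PH : List Int) : Prop :=
  ∀ dp ∈ PySem.List.enumerate Schedule 1, (∃ sp ∈ dp.2.2, sp.2 ≠ []) →
    (0 < p_rate.length ∧ 0 < f_rate.length ∧ 0 < k_rate.length ∧
     (6 ≤ dp.1 → 1 < p_rate.length ∧ 1 < f_rate.length ∧ 1 < k_rate.length) ∧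
     dp.1 ≤ (PH.length : Int) ∧
     (PySem.List.pyGetD PH (dp.1 - 1) 0 = 1 → 2 < p_rate.length ∧ 2 < f_rate.length ∧ 2 < k_rate.length))
instance (Schedule : List (String × List (String × List String))) (k_rate : List Int) (p_rate : List Int) (f_rate : List Int) (PH : List Int) : Decidable (Pre_cost_Schedule Schedule k_rate p_rate f_rate PH) := by unfold Pre_cost_Schedule; infer_instance

def pvWitness_cost_Schedule : (List (String × List (String × List String))) × List Int × List Int × List Int × List Int :=
  ([("d1", [("s1", ["A1", "X"]), ("s2", ["D2"])])], [1, 2, 3], [4, 5, 6], [7, 8, 9], [0])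

def Spec_cost_Schedule (Schedule : List (String × List (String × List String))) (k_rate : List Int) (p_rate : List Int) (f_rate : List Int) (PH : List Int) (out : Int) : Prop := out = cost_Schedule_alt Schedule k_rate p_rate f_rate PH
instance (Schedule : List (String × List (String × List String))) (k_rate : List Int) (p_rate : List Int) (f_rate : List Int) (PH : List Int) (out : Int) : Decidable (Spec_cost_Schedule Schedule k_rate p_rate f_rate PH out) := by unfold Spec_cost_Schedule; infer_instance

-- ===== CLAIM (what is proved, stated in full; the proofs are below) =====
def Claim_equal_cost_Schedule : Prop := ∀ (Schedule : List (String × List (String × List String))) (k_rate : List Int) (p_rate : List Int) (f_rate : List Int) (PH : List Int), Dom_cost_Schedule Schedule k_rate p_rate f_rate PH → Pre_cost_Schedule Schedule k_rate p_rate f_rate PH → Spec_cost_Schedule Schedule k_rate p_rate f_rate PH (cost_Schedule Schedule k_rate p_rate f_rate PH)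

-- ===== LEMMAS AND PROOFS =====

-- the (p, f, k) triple both programs select for a given 1-based day
def pvPFK (k_rate p_rate f_rate PH : List Int) (day : Int) : Int × Int × Int :=
  let p := PySem.List.pyGetD p_rate 0 0
  let f := PySem.List.pyGetD f_rate 0 0
  let k := PySem.List.pyGetD k_rate 0 0
  let pfk := if day ≥ 6 then
      (PySem.List.pyGetD p_rate 1 0, PySem.List.pyGetD f_rate 1 0, PySem.List.pyGetD k_rate 1 0)
    else (p, f, k)
  if PySem.List.pyGetD PH (day - 1) 0 = 1 then
    (PySem.List.pyGetD p_rate 2 0, PySem.List.pyGetD f_rate 2 0, PySem.List.pyGetD k_rate 2 0)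
  else pfk

-- the price of one shift with counts t on a given day/shift
def pvPrice (k_rate p_rate f_rate PH : List Int) (day shift : Int) (t : Int × Int × Int) : Int :=
  (if shift = 12 then (3 : Int) else 1) *
    ((pvPFK k_rate p_rate f_rate PH day).2.2 * t.1 +
     (pvPFK k_rate p_rate f_rate PH day).1 * t.2.1 +
     (pvPFK k_rate p_rate f_rate PH day).2.1 * t.2.2)

theorem pvCounts_from (stuff : List String) (t : Int × Int × Int) :
    stuff.foldl
      (fun (t : Int × Int × Int) ppl =>
        if pyA.contains ppl then (t.1 + 1, t.2.1, t.2.2)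
        else if pyD.contains ppl then (t.1, t.2.1 + 1, t.2.2)
        else (t.1, t.2.1, t.2.2 + 1)) t
    = (t.1 + (pvShiftCounts stuff).1, t.2.1 + (pvShiftCounts stuff).2.1, t.2.2 + (pvShiftCounts stuff).2.2) := by
  induction stuff generalizing t with
  | nil => simp [pvShiftCounts]
  | cons a l ih =>
    simp only [pvShiftCounts, List.foldl_cons]
    rw [ih, ih]
    split_ifs <;> simp [Prod.ext_iff] <;> ring

theorem pvInner (k_rate p_rate f_rate PH : List Int) (day shift : Int) (stuff : List String) (c : Int) :
    stuff.foldl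
      (fun (cost : Int) ppl =>
        let p := PySem.List.pyGetD p_rate 0 0
        let f := PySem.List.pyGetD f_rate 0 0
        let k := PySem.List.pyGetD k_rate 0 0
        let pfk := if day ≥ 6 then
            (PySem.List.pyGetD p_rate 1 0, PySem.List.pyGetD f_rate 1 0, PySem.List.pyGetD k_rate 1 0)
          else (p, f, k)
        let pfk := if PySem.List.pyGetD PH (day - 1) 0 = 1 then
            (PySem.List.pyGetD p_rate 2 0, PySem.List.pyGetD f_rate 2 0, PySem.List.pyGetD k_rate 2 0)
          else pfk
        let scale : Int := if shift = 12 then 3 else 1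
        if pyA.contains ppl then cost + scale * pfk.2.2
        else if pyD.contains ppl then cost + scale * pfk.1
        else cost + scale * pfk.2.1) c
    = c + pvPrice k_rate p_rate f_rate PH day shift (pvShiftCounts stuff) := by
  induction stuff generalizing c with
  | nil => simp [pvShiftCounts, pvPrice]
  | cons a l ih =>
    simp only [List.foldl_cons]
    rw [ih]
    rw [show pvShiftCounts (a :: l) =
        ((if pyA.contains a then ((0:Int)+1,(0:Int),(0:Int)) else if pyD.contains a then ((0:Int),(0:Int)+1,(0:Int)) else ((0:Int),(0:Int),(0:Int)+1)).1 + (pvShiftCounts l).1,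
         (if pyA.contains a then ((0:Int)+1,(0:Int),(0:Int)) else if pyD.contains a then ((0:Int),(0:Int)+1,(0:Int)) else ((0:Int),(0:Int),(0:Int)+1)).2.1 + (pvShiftCounts l).2.1,
         (if pyA.contains a then ((0:Int)+1,(0:Int),(0:Int)) else if pyD.contains a then ((0:Int),(0:Int)+1,(0:Int)) else ((0:Int),(0:Int),(0:Int)+1)).2.2 + (pvShiftCounts l).2.2)
      from by simp only [pvShiftCounts, List.foldl_cons]; exact pvCounts_from l _]
    simp only [pvPrice, pvPFK]
    split_ifs <;> ring

theorem pvDaySum (k_rate p_rate f_rate PH : List Int) (day : Int)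
    (shifts : List (String × List String)) (c m : Int) :
    (shifts.foldl
      (fun (st2 : Int × Int) shiftE =>
        let shift := st2.2 + 1
        let cost2 :=
          shiftE.2.foldl
            (fun (cost : Int) ppl =>
              let p := PySem.List.pyGetD p_rate 0 0
              let f := PySem.List.pyGetD f_rate 0 0
              let k := PySem.List.pyGetD k_rate 0 0
              let pfk := if day ≥ 6 then
                  (PySem.List.pyGetD p_rate 1 0, PySem.List.pyGetD f_rate 1 0, PySem.List.pyGetD k_rate 1 0)
                else (p, f, k)
              let pfk := if PySem.List.pyGetD PH (day - 1) 0 = 1 then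
                  (PySem.List.pyGetD p_rate 2 0, PySem.List.pyGetD f_rate 2 0, PySem.List.pyGetD k_rate 2 0)
                else pfk
              let scale : Int := if shift = 12 then 3 else 1
              if pyA.contains ppl then cost + scale * pfk.2.2
              else if pyD.contains ppl then cost + scale * pfk.1
              else cost + scale * pfk.2.1)
            st2.1
        (cost2, shift)) (c, m)).1
    = c + ((PySem.List.enumerate shifts (m + 1)).map
        (fun sp => pvPrice k_rate p_rate f_rate PH day sp.1 (pvShiftCounts sp.2.2))).sum := by
  induction shifts generalizing c m with
  | nil => simp [PySem.List.enumerate_nil]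
  | cons sE l ih =>
    simp only [List.foldl_cons, PySem.List.enumerate_cons, List.map_cons, List.sum_cons]
    rw [pvInner k_rate p_rate f_rate PH day (m + 1) sE.2 c]
    rw [ih]
    ring_nf

theorem pvA_aux (k_rate p_rate f_rate PH : List Int)
    (Schedule : List (String × List (String × List String))) (c n : Int) :
    (Schedule.foldl
      (fun (st : Int × Int) dayE =>
        let day := st.2 + 1
        let st2 :=
          dayE.2.foldl
            (fun (st2 : Int × Int) shiftE =>
              let shift := st2.2 + 1
              let cost2 :=
                shiftE.2.foldl
                  (fun (cost : Int) ppl =>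
                    let p := PySem.List.pyGetD p_rate 0 0
                    let f := PySem.List.pyGetD f_rate 0 0
                    let k := PySem.List.pyGetD k_rate 0 0
                    let pfk := if day ≥ 6 then
                        (PySem.List.pyGetD p_rate 1 0, PySem.List.pyGetD f_rate 1 0, PySem.List.pyGetD k_rate 1 0)
                      else (p, f, k)
                    let pfk := if PySem.List.pyGetD PH (day - 1) 0 = 1 then
                        (PySem.List.pyGetD p_rate 2 0, PySem.List.pyGetD f_rate 2 0, PySem.List.pyGetD k_rate 2 0)
                      else pfk
                    let scale : Int := if shift = 12 then 3 else 1
                    if pyA.contains ppl then cost + scale * pfk.2.2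
                    else if pyD.contains ppl then cost + scale * pfk.1
                    else cost + scale * pfk.2.1)
                  st2.1
              (cost2, shift))
            (st.1, 0)
        (st2.1, day))
      (c, n)).1
    = c + ((PySem.List.enumerate Schedule (n + 1)).map
        (fun dp => ((PySem.List.enumerate dp.2.2 1).map
          (fun sp => pvPrice k_rate p_rate f_rate PH dp.1 sp.1 (pvShiftCounts sp.2.2))).sum)).sum := by
  induction Schedule generalizing c n with
  | nil => simp [PySem.List.enumerate_nil]
  | cons dE l ih =>
    simp only [List.foldl_cons, PySem.List.enumerate_cons, List.map_cons, List.sum_cons]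
    rw [pvDaySum k_rate p_rate f_rate PH (n + 1) dE.2 c 0]
    rw [ih]
    ring_nf

theorem pvA_sum (Schedule : List (String × List (String × List String)))
    (k_rate p_rate f_rate PH : List Int) :
    cost_Schedule Schedule k_rate p_rate f_rate PH
    = ((PySem.List.enumerate Schedule 1).map
        (fun dp => ((PySem.List.enumerate dp.2.2 1).map
          (fun sp => pvPrice k_rate p_rate f_rate PH dp.1 sp.1 (pvShiftCounts sp.2.2))).sum)).sum := by
  unfold cost_Schedule
  rw [pvA_aux k_rate p_rate f_rate PH Schedule 0 0]
  ring_nf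

theorem pvSumFlatMap {α β : Type} (L : List α) (f : α → List β) (g : β → Int) :
    ((L.flatMap f).map g).sum = (L.map (fun a => ((f a).map g).sum)).sum := by
  induction L with
  | nil => simp
  | cons a t ih => simp [List.flatMap_cons, ih]

theorem pvBfold (k_rate p_rate f_rate PH : List Int)
    (l : List ((Int × Int) × (Int × Int × Int))) (c : Int) :
    l.foldl
      (fun (total : Int) e =>
        if e.2.1 ≠ 0 ∨ e.2.2.1 ≠ 0 ∨ e.2.2.2 ≠ 0 then
          let p := PySem.List.pyGetD p_rate 0 0
          let f := PySem.List.pyGetD f_rate 0 0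
          let k := PySem.List.pyGetD k_rate 0 0
          let pfk := if e.1.1 ≥ 6 then
              (PySem.List.pyGetD p_rate 1 0, PySem.List.pyGetD f_rate 1 0, PySem.List.pyGetD k_rate 1 0)
            else (p, f, k)
          let pfk := if PySem.List.pyGetD PH (e.1.1 - 1) 0 = 1 then
              (PySem.List.pyGetD p_rate 2 0, PySem.List.pyGetD f_rate 2 0, PySem.List.pyGetD k_rate 2 0)
            else pfk
          let scale : Int := if e.1.2 = 12 then 3 else 1
          total + scale * (pfk.2.2 * e.2.1 + pfk.1 * e.2.2.1 + pfk.2.1 * e.2.2.2)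
        else total) c
    = c + (l.map (fun e => pvPrice k_rate p_rate f_rate PH e.1.1 e.1.2 e.2)).sum := by
  induction l generalizing c with
  | nil => simp
  | cons e l ih =>
    simp only [List.foldl_cons, List.map_cons, List.sum_cons]
    rw [ih]
    by_cases h : e.2.1 ≠ 0 ∨ e.2.2.1 ≠ 0 ∨ e.2.2.2 ≠ 0
    · rw [if_pos h]
      simp only [pvPrice, pvPFK]
      ring
    · rw [if_neg h]
      push Not at h
      simp only [pvPrice, pvPFK, h.1, h.2.1, h.2.2]
      ring

theorem pvB_sum (Schedule : List (String × List (String × List String)))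
    (k_rate p_rate f_rate PH : List Int) :
    cost_Schedule_alt Schedule k_rate p_rate f_rate PH
    = ((PySem.List.enumerate Schedule 1).map
        (fun dp => ((PySem.List.enumerate dp.2.2 1).map
          (fun sp => pvPrice k_rate p_rate f_rate PH dp.1 sp.1 (pvShiftCounts sp.2.2))).sum)).sum := by
  unfold cost_Schedule_alt
  rw [pvBfold]
  rw [pvSumFlatMap]
  simp [List.map_map, Function.comp_def]

-- ===== VERDICT (by name: the statement is the Claim_ definition above) =====
theorem cost_Schedule_spec : Claim_equal_cost_Schedule := by
  intro Schedule k_rate p_rate f_rate PH _ _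
  unfold Spec_cost_Schedule
  rw [pvA_sum, pvB_sum]
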